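-- pv_equiv track=rewrite | github.com/umar-ali/umar-solves | codechef/Snakproc.py | Solve
-- ===== SOURCE A (Python) =====
-- def Solve(L, S):
--     new_S = ""
--     res = 'Valid'
--     for i in S:
--         if i!= '.':
--             new_S += i
--
--     L = len(new_S)
--     if L > 0:
--         if new_S[0] == 'T' or new_S[L-1] == 'H':
--             return 'Invalid'
--
--         for i in range(L):
--             if (i%2 ==0 and new_S[i] =='T') or (i%2 == 1 and new_S[i] == 'H'):
--                 return "Invalid"
--     return res
-- ===== SOURCE B (Python) =====
-- def Solve(L, S):
--     idx = 0
--     last = '.'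
--     for c in S:
--         if c != '.':
--             if (idx % 2 == 0 and c == 'T') or (idx % 2 == 1 and c == 'H'):
--                 return 'Invalid'
--             last = c
--             idx += 1
--     if idx > 0 and last == 'H':
--         return 'Invalid'
--     return 'Valid'
-- ===== Notes on version B (the rewrite author's own statement) =====
-- stated objective: simpler
-- what changed: Single fused pass over S with a position counter and last-kept-char variable replaces A's two phases (building the dot-filtered string new_S, then indexed first/last and parity scans over it); the intermediate string and the redundant new_S[0]=='T' check disappear.
import Mathlib
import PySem

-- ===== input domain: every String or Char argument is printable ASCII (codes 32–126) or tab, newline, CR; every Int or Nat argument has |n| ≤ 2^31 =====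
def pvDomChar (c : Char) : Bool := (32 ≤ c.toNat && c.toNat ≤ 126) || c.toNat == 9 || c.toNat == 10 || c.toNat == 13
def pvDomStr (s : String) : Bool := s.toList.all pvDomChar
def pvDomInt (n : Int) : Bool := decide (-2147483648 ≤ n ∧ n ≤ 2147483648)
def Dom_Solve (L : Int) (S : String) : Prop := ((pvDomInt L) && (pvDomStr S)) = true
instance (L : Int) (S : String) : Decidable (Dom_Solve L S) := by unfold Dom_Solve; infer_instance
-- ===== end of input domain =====

-- B fuses A's two phases (dot-filtering into new_S, then indexed scans) into one pass
-- with a position counter and a last-kept-char variable; objective: simpler.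

-- ===== PORT A =====
-- the loop 'for i in range(L): if (i%2==0 and new_S[i]=='T') or (i%2==1 and new_S[i]=='H'): return "Invalid"'
def solveLoopA (newS : List Char) : List Int → String
  | [] => "Valid"
  | i :: rest =>
    if (i % 2 = 0 ∧ (PySem.List.pyGet? newS i).getD ' ' = 'T')
        ∨ (i % 2 = 1 ∧ (PySem.List.pyGet? newS i).getD ' ' = 'H') then "Invalid"
    else solveLoopA newS rest

def Solve (L : Int) (S : String) : String :=
  let newS := S.toList.foldl (fun acc i => if i ≠ '.' then acc ++ [i] else acc) []
  let n : Int := newS.length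
  if n > 0 then
    if (PySem.List.pyGet? newS 0).getD ' ' = 'T'
        ∨ (PySem.List.pyGet? newS (n - 1)).getD ' ' = 'H' then "Invalid"
    else solveLoopA newS (PySem.List.pyRange 0 n 1)
  else "Valid"

-- ===== PORT B =====
-- the single fused loop of Source B, carrying (idx, last) as state
def altLoop : List Char → Int → Char → String
  | [], idx, last => if idx > 0 ∧ last = 'H' then "Invalid" else "Valid"
  | c :: rest, idx, last =>
    if c ≠ '.' then
      if (idx % 2 = 0 ∧ c = 'T') ∨ (idx % 2 = 1 ∧ c = 'H') then "Invalid"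
      else altLoop rest (idx + 1) c
    else altLoop rest idx last

def Solve_alt (L : Int) (S : String) : String := altLoop S.toList 0 '.'

-- ===== PRECONDITION & SPEC =====
def Spec_Solve (L : Int) (S : String) (out : String) : Prop := out = Solve_alt L S
instance (L : Int) (S : String) (out : String) : Decidable (Spec_Solve L S out) := by unfold Spec_Solve; infer_instance

-- ===== CLAIM (what is proved, stated in full; the proofs are below) =====
def Claim_equal_Solve : Prop := ∀ (L : Int) (S : String), Dom_Solve L S → Spec_Solve L S (Solve L S)

-- ===== LEMMAS AND PROOFS =====

/-- the dot-filtered list (A's `new_S`). -/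
def pvKeep : List Char → List Char
  | [] => []
  | c :: r => if c ≠ '.' then c :: pvKeep r else pvKeep r

/-- whether some element violates the parity rule, positions counted from `idx`. -/
def pvViol : List Char → Int → Bool
  | [], _ => false
  | c :: rest, idx =>
    decide ((idx % 2 = 0 ∧ c = 'T') ∨ (idx % 2 = 1 ∧ c = 'H')) || pvViol rest (idx + 1)

/-- last element, with default. -/
def pvLastD : List Char → Char → Char
  | [], d => d
  | c :: rest, _ => pvLastD rest c

theorem pvKeep_foldl (cs : List Char) (acc : List Char) :
    cs.foldl (fun acc i => if i ≠ '.' then acc ++ [i] else acc) acc = acc ++ pvKeep cs := by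
  induction cs generalizing acc with
  | nil => simp [pvKeep]
  | cons c r ih =>
    rw [List.foldl_cons]
    by_cases hc : c ≠ '.'
    · rw [if_pos hc, ih, pvKeep, if_pos hc, List.append_assoc, List.singleton_append]
    · rw [if_neg hc, ih, pvKeep, if_neg hc]

theorem altLoop_char (cs : List Char) (idx : Int) (last : Char) :
    altLoop cs idx last =
      if pvViol (pvKeep cs) idx = true ∨ (0 < idx + (pvKeep cs).length ∧ pvLastD (pvKeep cs) last = 'H')
      then "Invalid" else "Valid" := by
  induction cs generalizing idx last with
  | nil =>
    show (if idx > 0 ∧ last = 'H' then "Invalid" else "Valid") = _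
    simp only [pvKeep, pvViol, pvLastD, List.length_nil, Nat.cast_zero, add_zero]
    refine if_congr ?_ rfl rfl
    constructor
    · exact fun h => Or.inr h
    · rintro (h | h)
      · exact absurd h (by simp)
      · exact h
  | cons c rest ih =>
    by_cases hc : c ≠ '.'
    · show (if c ≠ '.' then
          if (idx % 2 = 0 ∧ c = 'T') ∨ (idx % 2 = 1 ∧ c = 'H') then "Invalid"
          else altLoop rest (idx + 1) c
        else altLoop rest idx last) = _
      rw [if_pos hc]
      rw [show pvKeep (c :: rest) = c :: pvKeep rest from by rw [pvKeep, if_pos hc]]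
      rw [pvViol]
      by_cases hv : (idx % 2 = 0 ∧ c = 'T') ∨ (idx % 2 = 1 ∧ c = 'H')
      · rw [if_pos hv, decide_eq_true hv, Bool.true_or, if_pos (Or.inl rfl)]
      · rw [if_neg hv, decide_eq_false hv, Bool.false_or, ih, pvLastD, List.length_cons]
        refine if_congr ?_ rfl rfl
        have : idx + ((pvKeep rest).length + 1 : Nat) = idx + 1 + (pvKeep rest).length := by
          push_cast; ring
        rw [this]
    · have hc' : c = '.' := by simpa using hc
      show (if c ≠ '.' then _ else altLoop rest idx last) = _
      rw [if_neg hc]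
      rw [show pvKeep (c :: rest) = pvKeep rest from by rw [pvKeep, if_neg hc]]
      exact ih idx last

theorem solveLoopA_char (f2 f1 : List Char) :
    solveLoopA (f1 ++ f2) (PySem.List.pyRange f1.length (f1.length + f2.length) 1) =
      if pvViol f2 (f1.length) = true then "Invalid" else "Valid" := by
  induction f2 generalizing f1 with
  | nil =>
    rw [PySem.List.pyRange_one_eq_nil (by simp)]
    simp [solveLoopA, pvViol]
  | cons c rest ih =>
    rw [PySem.List.pyRange_one_cons (by push_cast [List.length_cons]; omega)]
    have hget : PySem.List.pyGet? (f1 ++ c :: rest) (f1.length : Int) = some c :=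
      PySem.List.pyGet?_append_length f1 rest c
    show (if ((f1.length : Int) % 2 = 0 ∧ (PySem.List.pyGet? (f1 ++ c :: rest) (f1.length : Int)).getD ' ' = 'T')
          ∨ ((f1.length : Int) % 2 = 1 ∧ (PySem.List.pyGet? (f1 ++ c :: rest) (f1.length : Int)).getD ' ' = 'H')
        then "Invalid" else solveLoopA (f1 ++ c :: rest) _) = _
    rw [hget]
    simp only [Option.getD_some]
    rw [pvViol]
    by_cases hv : ((f1.length : Int) % 2 = 0 ∧ c = 'T') ∨ ((f1.length : Int) % 2 = 1 ∧ c = 'H')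
    · rw [if_pos hv, decide_eq_true hv, Bool.true_or, if_pos rfl]
    · rw [if_neg hv, decide_eq_false hv, Bool.false_or]
      have e1 : (f1.length : Int) + 1 = ((f1 ++ [c]).length : Int) := by push_cast; simp
      have e2 : (f1.length : Int) + ((c :: rest).length : Int)
          = ((f1 ++ [c]).length : Int) + (rest.length : Int) := by push_cast; simp; ring
      have e3 : f1 ++ c :: rest = (f1 ++ [c]) ++ rest := by simp
      rw [e2, e3, e1, ih (f1 ++ [c]), ← e1]

theorem pvLastD_getLast (f : List Char) (d : Char) (h : f ≠ []) :
    PySem.List.pyGet? f ((f.length : Int) - 1) = some (pvLastD f d) := by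
  induction f generalizing d with
  | nil => exact absurd rfl h
  | cons c rest ih =>
    cases rest with
    | nil =>
      show PySem.List.pyGet? [c] ((1 : Int) - 1) = some (pvLastD [c] d)
      norm_num
      simp [pvLastD]
    | cons c2 r2 =>
      have h1 : ((c :: c2 :: r2).length : Int) - 1
          = ((((c2 :: r2).length - 1 : Nat) : Int)) + 1 := by
        push_cast [List.length_cons]; omega
      rw [h1, PySem.List.pyGet?_cons_succ]
      have h2 : (((c2 :: r2).length - 1 : Nat) : Int) = ((c2 :: r2).length : Int) - 1 := by
        push_cast [List.length_cons]; omega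
      rw [h2, ih c (by simp), pvLastD, pvLastD, pvLastD]

theorem pvViol_head_T (f : List Char) (h : f ≠ [])
    (hT : (PySem.List.pyGet? f 0).getD ' ' = 'T') : pvViol f 0 = true := by
  cases f with
  | nil => exact absurd rfl h
  | cons c rest =>
    rw [PySem.List.pyGet?_zero_cons, Option.getD_some] at hT
    rw [pvViol, decide_eq_true (Or.inl ⟨by decide, hT⟩), Bool.true_or]

-- ===== VERDICT (by name: the statement is the Claim_ definition above) =====
theorem Solve_spec : Claim_equal_Solve := by
  intro L S _
  show Solve L S = Solve_alt L S
  unfold Solve Solve_alt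
  rw [altLoop_char]
  simp only [pvKeep_foldl, List.nil_append]
  set f := pvKeep S.toList with hf
  by_cases hne : f = []
  · simp [hne, pvViol, pvLastD]
  · have hpos : (0 : Int) < (f.length : Int) := by
      exact_mod_cast List.length_pos_iff.mpr hne
    rw [if_pos hpos]
    have hlast := pvLastD_getLast f '.' hne
    by_cases hfl : (PySem.List.pyGet? f 0).getD ' ' = 'T'
        ∨ (PySem.List.pyGet? f ((f.length : Int) - 1)).getD ' ' = 'H'
    · rw [if_pos hfl]
      rcases hfl with hT | hH
      · rw [if_pos (Or.inl (pvViol_head_T f hne hT))]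
      · rw [hlast, Option.getD_some] at hH
        rw [if_pos (Or.inr ⟨by omega, hH⟩)]
    · rw [if_neg hfl]
      push_neg at hfl
      have hA := solveLoopA_char f []
      simp only [List.nil_append, List.length_nil, Nat.cast_zero, zero_add] at hA
      rw [hA]
      by_cases hv : pvViol f 0 = true
      · rw [if_pos hv, if_pos (Or.inl hv)]
      · rw [if_neg hv, if_neg]
        rintro (h | ⟨_, hH⟩)
        · exact hv h
        · rw [hlast, Option.getD_some] at hfl
          exact hfl.2 hH
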